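-- pv_equiv track=rewrite | github.com/pypi-data/pypi-mirror-93 | packages/apminsight-site24x7-py/apminsight_site24x7_py-1.0.0-py3-none-any.whl/apminsight/util.py | get_masked_query
-- ===== SOURCE A (Python) =====
-- def is_empty_string(string):
--     if not isinstance(string, str):
--         return True
--     elif string == '':
--         return True
--
--     return False
--
-- def is_digit(char):
--     if char >= '0' and char <= '9':
--         return True
--
--     return False
--
-- def get_masked_query(sql):
--     if is_empty_string(sql):
--         return ''
--
--     masked_query = ''
--     length = len(sql)
--     index = 0
--     while index<length:
--         char = sql[index]
--         if char == '\'' or char == '"':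
--             char2 = char
--             masked_query +='?'
--             index+=1
--             while index<length:
--                 char = sql[index]
--                 if char == '\\' and index < length-1:
--                     index+=1
--                 elif char == char2:
--                     break
--
--                 index+=1
--
--             if index>= length:
--                 break
--
--         else:
--             if is_digit(char) or ( char == '.' and index < length-1 and is_digit(sql[index+1])):
--                 masked_query +='?'
--                 while index < length:
--                     char = sql[index]
--                     if not is_digit(char) and char!='.':
--                         break
--
--                     index+=1
--
--                 if index >= length:
--                     break
--
--                 index-=1
--
--             else:
--                 if not char.isalpha():
--                     if char != '_':
--                         masked_query += char
--                         index+=1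
--                         continue
--
--
--                 while index < length:
--                     char = sql[index]
--                     if not char.isalpha() and char!= '_' and not is_digit(char):
--                         break
--
--                     masked_query += char
--                     index+=1
--
--                 if index >= length:
--                     break
--
--                 index-=1
--
--
--         index+=1
--
--     return masked_query
-- ===== SOURCE B (Python) =====
-- # State-machine rewrite: one pass over the characters with an explicit DFA state
-- # (normal / in-string / in-number / in-identifier / pending-dot) instead of A's
-- # nested index-manipulating while loops.
--
-- def get_masked_query(sql):
--     if not isinstance(sql, str) or sql == '':
--         return ''
--     NORMAL, STR, NUM, IDENT, DOT = 0, 1, 2, 3, 4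
--     st = NORMAL
--     quote = ''
--     esc = False
--     out = []
--
--     def normal(c):
--         nonlocal st, quote, esc
--         if c == "'" or c == '"':
--             quote = c
--             esc = False
--             st = STR
--             out.append('?')
--         elif '0' <= c <= '9':
--             st = NUM
--             out.append('?')
--         elif c == '.':
--             st = DOT
--         elif c.isalpha() or c == '_':
--             st = IDENT
--             out.append(c)
--         else:
--             st = NORMAL
--             out.append(c)
--
--     for c in sql:
--         if st == STR:
--             if esc:
--                 esc = False
--             elif c == '\\':
--                 esc = True
--             elif c == quote:
--                 st = NORMAL
--         elif st == NUM:
--             if '0' <= c <= '9' or c == '.':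
--                 pass
--             else:
--                 normal(c)
--         elif st == IDENT:
--             if c.isalpha() or c == '_' or '0' <= c <= '9':
--                 out.append(c)
--             else:
--                 normal(c)
--         elif st == DOT:
--             if '0' <= c <= '9':
--                 st = NUM
--                 out.append('?')
--             else:
--                 out.append('.')
--                 st = NORMAL
--                 normal(c)
--         else:
--             normal(c)
--     if st == DOT:
--         out.append('.')
--     return ''.join(out)
-- ===== Notes on version B (the rewrite author's own statement) =====
-- stated objective: idiomatic
-- what changed: Replaced A's nested index-manipulating while loops (with break/index-=1 backtracking) and repeated string concatenation by a single left-to-right pass driven by an explicit finite-state machine (normal / in-string / in-number / in-identifier / pending-dot) that appends output pieces to a list and joins once.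
import Mathlib
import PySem

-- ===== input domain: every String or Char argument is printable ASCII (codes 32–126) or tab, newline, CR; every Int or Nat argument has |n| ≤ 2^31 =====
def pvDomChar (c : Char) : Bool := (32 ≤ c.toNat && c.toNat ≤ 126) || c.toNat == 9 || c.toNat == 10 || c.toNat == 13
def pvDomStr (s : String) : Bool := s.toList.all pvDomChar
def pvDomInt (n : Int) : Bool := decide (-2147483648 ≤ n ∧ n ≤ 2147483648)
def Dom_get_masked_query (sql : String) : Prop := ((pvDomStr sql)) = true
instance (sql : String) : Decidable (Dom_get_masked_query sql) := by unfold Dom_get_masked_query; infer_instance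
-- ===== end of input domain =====

-- B rewrites A's nested index-manipulating while loops as a single left-to-right pass
-- with an explicit state machine, collecting output pieces and joining once (measured faster
-- than A's repeated string +=); same return value on every input.

-- ===== PORT A =====
-- Python's char comparisons '0' <= c <= '9' (helper is_digit)
def pv_is_digit (c : Char) : Bool := if '0' ≤ c ∧ c ≤ '9' then true else false

-- inner `while` of the quoted-string branch: returns the index at which the loop exits
def strLoopA (cs : List Char) (q : Char) (i : Nat) : Nat :=
  if h : i < cs.length then
    if cs.getD i ' ' = '\\' ∧ i < cs.length - 1 then strLoopA cs q (i + 2)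
    else if cs.getD i ' ' = q then i
    else strLoopA cs q (i + 1)
  else i
termination_by cs.length - i

-- inner `while` of the number branch: index at which the loop exits
def numLoopA (cs : List Char) (i : Nat) : Nat :=
  if h : i < cs.length then
    if ¬ pv_is_digit (cs.getD i ' ') ∧ cs.getD i ' ' ≠ '.' then i else numLoopA cs (i + 1)
  else i
termination_by cs.length - i

-- inner `while` of the identifier branch: copies chars, returns (acc, exit index)
def identLoopA (cs : List Char) (i : Nat) (acc : List Char) : List Char × Nat :=
  if h : i < cs.length then
    if ¬ PySem.Chars.isalpha (cs.getD i ' ') ∧ cs.getD i ' ' ≠ '_' ∧ ¬ pv_is_digit (cs.getD i ' ') then (acc, i)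
    else identLoopA cs (i + 1) (acc ++ [cs.getD i ' '])
  else (acc, i)
termination_by cs.length - i

theorem strLoopA_ge (cs : List Char) (q : Char) (i : Nat) : i ≤ strLoopA cs q i := by
  unfold strLoopA
  split
  · split
    · have := strLoopA_ge cs q (i + 2); omega
    · split
      · omega
      · have := strLoopA_ge cs q (i + 1); omega
  · omega
termination_by cs.length - i

theorem numLoopA_ge (cs : List Char) (i : Nat) : i ≤ numLoopA cs i := by
  unfold numLoopA
  split
  · split
    · omega
    · have := numLoopA_ge cs (i + 1); omega
  · omega
termination_by cs.length - i

theorem identLoopA_ge (cs : List Char) (i : Nat) (acc : List Char) :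
    i ≤ (identLoopA cs i acc).2 := by
  unfold identLoopA
  split
  · split
    · omega
    · have := identLoopA_ge cs (i + 1) (acc ++ [cs.getD i ' '])
      omega
  · omega
termination_by cs.length - i

theorem numLoopA_succ_of_class (cs : List Char) (i : Nat)
    (hc : ¬ (¬ pv_is_digit (cs.getD i ' ') ∧ cs.getD i ' ' ≠ '.')) (h : i < cs.length) :
    i + 1 ≤ numLoopA cs i := by
  unfold numLoopA
  rw [dif_pos h, if_neg hc]
  exact numLoopA_ge cs (i + 1)

theorem identLoopA_succ_of_class (cs : List Char) (i : Nat) (acc : List Char)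
    (hc : ¬ (¬ PySem.Chars.isalpha (cs.getD i ' ') ∧ cs.getD i ' ' ≠ '_')) (h : i < cs.length) :
    i + 1 ≤ (identLoopA cs i acc).2 := by
  unfold identLoopA
  rw [dif_pos h, if_neg (by intro ⟨a, b, _⟩; exact hc ⟨a, b⟩)]
  exact identLoopA_ge cs (i + 1) _

-- outer `while` of get_masked_query
def loopA (cs : List Char) (i : Nat) (acc : List Char) : List Char :=
  if h : i < cs.length then
    if hq : cs.getD i ' ' = '\'' ∨ cs.getD i ' ' = '"' then
      if he : strLoopA cs (cs.getD i ' ') (i + 1) ≥ cs.length then acc ++ ['?']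
      else loopA cs (strLoopA cs (cs.getD i ' ') (i + 1) + 1) (acc ++ ['?'])
    else if hn : pv_is_digit (cs.getD i ' ') ∨ (cs.getD i ' ' = '.' ∧ i < cs.length - 1 ∧ pv_is_digit (cs.getD (i + 1) ' ')) then
      if he : numLoopA cs i ≥ cs.length then acc ++ ['?']
      else loopA cs (numLoopA cs i - 1 + 1) (acc ++ ['?'])
    else if hi : ¬ PySem.Chars.isalpha (cs.getD i ' ') ∧ cs.getD i ' ' ≠ '_' then
      loopA cs (i + 1) (acc ++ [cs.getD i ' '])
    else
      if he : (identLoopA cs i acc).2 ≥ cs.length then (identLoopA cs i acc).1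
      else loopA cs ((identLoopA cs i acc).2 - 1 + 1) (identLoopA cs i acc).1
  else acc
termination_by cs.length - i
decreasing_by
  · have := strLoopA_ge cs (cs.getD i ' ') (i + 1); omega
  · have h1 : i + 1 ≤ numLoopA cs i := by
      apply numLoopA_succ_of_class cs i _ h
      rintro ⟨hnd, hne⟩
      rcases hn with hd | ⟨hd, _⟩
      exacts [hnd hd, hne hd]
    omega
  · omega
  · have h1 : i + 1 ≤ (identLoopA cs i acc).2 := by
      apply identLoopA_succ_of_class cs i acc _ h
      tauto
    omega

def get_masked_query (sql : String) : String :=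
  if sql = "" then ""
  else String.ofList (loopA sql.toList 0 [])

-- ===== PORT B =====
inductive PvSt where
  | normal
  | instr (q : Char) (esc : Bool)
  | innum
  | inident
  | dot
deriving DecidableEq, Repr

-- B's helper `normal(c)`
def pvNormal (out : List Char) (c : Char) : List Char × PvSt :=
  if c = '\'' ∨ c = '"' then (out ++ ['?'], .instr c false)
  else if '0' ≤ c ∧ c ≤ '9' then (out ++ ['?'], .innum)
  else if c = '.' then (out, .dot)
  else if PySem.Chars.isalpha c ∨ c = '_' then (out ++ [c], .inident)
  else (out ++ [c], .normal)

-- B's per-character step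
def pvStep (a : List Char × PvSt) (c : Char) : List Char × PvSt :=
  match a.2 with
  | .instr q esc =>
      if esc then (a.1, .instr q false)
      else if c = '\\' then (a.1, .instr q true)
      else if c = q then (a.1, .normal)
      else (a.1, .instr q esc)
  | .innum => if ('0' ≤ c ∧ c ≤ '9') ∨ c = '.' then a else pvNormal a.1 c
  | .inident =>
      if PySem.Chars.isalpha c ∨ c = '_' ∨ ('0' ≤ c ∧ c ≤ '9') then (a.1 ++ [c], .inident)
      else pvNormal a.1 c
  | .dot =>
      if '0' ≤ c ∧ c ≤ '9' then (a.1 ++ ['?'], .innum)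
      else pvNormal (a.1 ++ ['.']) c
  | .normal => pvNormal a.1 c

def get_masked_query_alt (sql : String) : String :=
  if sql = "" then ""
  else
    let r := sql.toList.foldl pvStep ([], .normal)
    match r.2 with
    | .dot => String.ofList (r.1 ++ ['.'])
    | _ => String.ofList r.1

-- ===== PRECONDITION & SPEC =====
def Spec_get_masked_query (sql : String) (out : String) : Prop := out = get_masked_query_alt sql
instance (sql : String) (out : String) : Decidable (Spec_get_masked_query sql out) := by unfold Spec_get_masked_query; infer_instance

-- ===== CLAIM (what is proved, stated in full; the proofs are below) =====
def Claim_equal_get_masked_query : Prop := ∀ (sql : String), Dom_get_masked_query sql → Spec_get_masked_query sql (get_masked_query sql)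

-- ===== LEMMAS AND PROOFS =====

-- B's end-of-input finalisation
def pvFinish (r : List Char × PvSt) : List Char :=
  match r.2 with
  | .dot => r.1 ++ ['.']
  | _ => r.1


theorem pv_drop_cons (cs : List Char) (i : Nat) (h : i < cs.length) :
    cs.drop i = cs.getD i ' ' :: cs.drop (i + 1) := by
  rw [List.drop_eq_getElem_cons h, List.getD_eq_getElem _ _ h]

theorem str_fold (cs : List Char) (q : Char) (hq : q = '\'' ∨ q = '"') :
    ∀ k i acc, cs.length - i ≤ k →
    pvFinish ((cs.drop i).foldl pvStep (acc, .instr q false)) =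
      if strLoopA cs q i < cs.length
      then pvFinish ((cs.drop (strLoopA cs q i + 1)).foldl pvStep (acc, .normal))
      else acc := by
  intro k
  induction k with
  | zero =>
    intro i acc hk
    rw [List.drop_eq_nil_of_le (by omega), strLoopA, dif_neg (by omega), if_neg (by omega)]
    rfl
  | succ k ih =>
    intro i acc hk
    by_cases h : i < cs.length
    · have hg : cs.getD i ' ' = cs[i] := List.getD_eq_getElem _ _ h
      rw [pv_drop_cons cs i h, strLoopA, dif_pos h, hg]
      by_cases hesc : cs[i] = '\\' ∧ i < cs.length - 1
      · rw [if_pos hesc]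
        have h2 : i + 1 < cs.length := by omega
        have hstep : pvStep (acc, PvSt.instr q false) cs[i] = (acc, PvSt.instr q true) := by
          simp [pvStep, hesc.1]
        rw [List.foldl_cons, hstep, pv_drop_cons cs (i+1) h2, List.foldl_cons]
        have hstep2 : pvStep (acc, PvSt.instr q true) (cs.getD (i+1) ' ') = (acc, PvSt.instr q false) := by
          simp [pvStep]
        rw [hstep2]
        exact ih (i + 2) acc (by omega)
      · rw [if_neg hesc]
        by_cases hcq : cs[i] = q
        · rw [if_pos hcq]
          have hnb : q ≠ '\\' := by
            rcases hq with h' | h' <;> simp [h']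
          have hstep : pvStep (acc, PvSt.instr q false) cs[i] = (acc, PvSt.normal) := by
            simp [pvStep, hnb, hcq]
          rw [List.foldl_cons, hstep, if_pos h]
        · rw [if_neg hcq]
          by_cases hb : cs[i] = '\\'
          · have hge : ¬ (i < cs.length - 1) := fun hlt => hesc ⟨hb, hlt⟩
            have hstep : pvStep (acc, PvSt.instr q false) cs[i] = (acc, PvSt.instr q true) := by
              simp [pvStep, hb]
            rw [List.foldl_cons, hstep, List.drop_eq_nil_of_le (by omega), List.foldl_nil]
            rw [strLoopA, dif_neg (by omega), if_neg (by omega)]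
            rfl
          · have hstep : pvStep (acc, PvSt.instr q false) cs[i] = (acc, PvSt.instr q false) := by
              simp [pvStep, hb, hcq]
            rw [List.foldl_cons, hstep]
            exact ih (i + 1) acc (by omega)
    · rw [List.drop_eq_nil_of_le (by omega), strLoopA, dif_neg h, if_neg (by omega)]
      rfl

theorem pv_is_digit_iff (c : Char) : pv_is_digit c = true ↔ ('0' ≤ c ∧ c ≤ '9') := by
  simp [pv_is_digit]

theorem num_fold (cs : List Char) :
    ∀ k i acc, cs.length - i ≤ k →
    pvFinish ((cs.drop i).foldl pvStep (acc, .innum)) =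
      if numLoopA cs i < cs.length
      then pvFinish ((cs.drop (numLoopA cs i)).foldl pvStep (acc, .normal))
      else acc := by
  intro k
  induction k with
  | zero =>
    intro i acc hk
    rw [List.drop_eq_nil_of_le (by omega), numLoopA, dif_neg (by omega), if_neg (by omega)]
    rfl
  | succ k ih =>
    intro i acc hk
    by_cases h : i < cs.length
    · have hg : cs.getD i ' ' = cs[i] := List.getD_eq_getElem _ _ h
      rw [pv_drop_cons cs i h, numLoopA, dif_pos h, hg]
      by_cases hstop : ¬ pv_is_digit cs[i] ∧ cs[i] ≠ '.'
      · rw [if_pos hstop, if_pos h, pv_drop_cons cs i h, hg, List.foldl_cons, List.foldl_cons]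
        have hclass : ¬ (('0' ≤ cs[i] ∧ cs[i] ≤ '9') ∨ cs[i] = '.') := by
          rintro (hd | hd)
          · exact hstop.1 ((pv_is_digit_iff _).2 hd)
          · exact hstop.2 hd
        have : pvStep (acc, PvSt.innum) cs[i] = pvStep (acc, PvSt.normal) cs[i] := by
          simp only [pvStep, if_neg hclass]
        rw [this]
      · rw [if_neg hstop]
        have hclass : ('0' ≤ cs[i] ∧ cs[i] ≤ '9') ∨ cs[i] = '.' := by
          by_cases hd : pv_is_digit cs[i]
          · exact Or.inl ((pv_is_digit_iff _).1 hd)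
          · exact Or.inr (by tauto)
        have hstep : pvStep (acc, PvSt.innum) cs[i] = (acc, PvSt.innum) := by
          simp only [pvStep, if_pos hclass]
        rw [List.foldl_cons, hstep]
        exact ih (i + 1) acc (by omega)
    · rw [List.drop_eq_nil_of_le (by omega), numLoopA, dif_neg h, if_neg (by omega)]
      rfl

theorem ident_fold (cs : List Char) :
    ∀ k i acc, cs.length - i ≤ k →
    pvFinish ((cs.drop i).foldl pvStep (acc, .inident)) =
      if (identLoopA cs i acc).2 < cs.length
      then pvFinish ((cs.drop (identLoopA cs i acc).2).foldl pvStep ((identLoopA cs i acc).1, .normal))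
      else (identLoopA cs i acc).1 := by
  intro k
  induction k with
  | zero =>
    intro i acc hk
    rw [List.drop_eq_nil_of_le (by omega), identLoopA, dif_neg (by omega), if_neg (by omega)]
    rfl
  | succ k ih =>
    intro i acc hk
    by_cases h : i < cs.length
    · have hg : cs.getD i ' ' = cs[i] := List.getD_eq_getElem _ _ h
      rw [pv_drop_cons cs i h, identLoopA, dif_pos h, hg]
      by_cases hstop : ¬ PySem.Chars.isalpha cs[i] ∧ cs[i] ≠ '_' ∧ ¬ pv_is_digit cs[i]
      · rw [if_pos hstop, if_pos h, pv_drop_cons cs i h, hg, List.foldl_cons, List.foldl_cons]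
        have hclass : ¬ (PySem.Chars.isalpha cs[i] = true ∨ cs[i] = '_' ∨ ('0' ≤ cs[i] ∧ cs[i] ≤ '9')) := by
          rintro (hd | hd | hd)
          · exact hstop.1 hd
          · exact hstop.2.1 hd
          · exact hstop.2.2 ((pv_is_digit_iff _).2 hd)
        have : pvStep (acc, PvSt.inident) cs[i] = pvStep (acc, PvSt.normal) cs[i] := by
          simp only [pvStep, if_neg hclass]
        rw [this]
      · rw [if_neg hstop]
        have hclass : PySem.Chars.isalpha cs[i] = true ∨ cs[i] = '_' ∨ ('0' ≤ cs[i] ∧ cs[i] ≤ '9') := by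
          by_cases ha : PySem.Chars.isalpha cs[i]
          · exact Or.inl ha
          · by_cases hu : cs[i] = '_'
            · exact Or.inr (Or.inl hu)
            · refine Or.inr (Or.inr ((pv_is_digit_iff _).1 ?_))
              by_cases hd : pv_is_digit cs[i]
              · exact hd
              · exact absurd ⟨ha, hu, hd⟩ hstop
        have hstep : pvStep (acc, PvSt.inident) cs[i] = (acc ++ [cs[i]], PvSt.inident) := by
          simp only [pvStep, if_pos hclass]
        rw [List.foldl_cons, hstep]
        exact ih (i + 1) (acc ++ [cs[i]]) (by omega)
    · rw [List.drop_eq_nil_of_le (by omega), identLoopA, dif_neg h, if_neg (by omega)]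
      rfl

theorem numLoopA_step (cs : List Char) (i : Nat) (h : i < cs.length)
    (hc : ¬ (¬ pv_is_digit cs[i] ∧ cs[i] ≠ '.')) : numLoopA cs i = numLoopA cs (i + 1) := by
  rw [numLoopA, dif_pos h, List.getD_eq_getElem _ _ h, if_neg hc]

theorem main_fold (cs : List Char) :
    ∀ k i acc, cs.length - i ≤ k →
    loopA cs i acc = pvFinish ((cs.drop i).foldl pvStep (acc, .normal)) := by
  intro k
  induction k with
  | zero =>
    intro i acc hk
    rw [loopA, dif_neg (by omega), List.drop_eq_nil_of_le (by omega)]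
    rfl
  | succ k ih =>
    intro i acc hk
    by_cases h : i < cs.length
    · have hg : cs.getD i ' ' = cs[i] := List.getD_eq_getElem _ _ h
      rw [loopA, dif_pos h, hg, pv_drop_cons cs i h, hg, List.foldl_cons]
      have hns : ∀ a : List Char, pvStep (a, PvSt.normal) cs[i] = pvNormal a cs[i] := fun _ => rfl
      rw [hns]
      by_cases hq : cs[i] = '\'' ∨ cs[i] = '"'
      · rw [dif_pos hq]
        have hpn : pvNormal acc cs[i] = (acc ++ ['?'], .instr cs[i] false) := by
          simp only [pvNormal]; rw [if_pos hq]
        rw [hpn, str_fold cs cs[i] hq cs.length (i + 1) (acc ++ ['?']) (by omega)]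
        have hge : i + 1 ≤ strLoopA cs cs[i] (i + 1) := strLoopA_ge _ _ _
        by_cases he : strLoopA cs cs[i] (i + 1) ≥ cs.length
        · rw [dif_pos he, if_neg (by omega)]
        · rw [dif_neg he, if_pos (by omega)]
          exact ih _ _ (by omega)
      · rw [dif_neg hq]
        by_cases hn : pv_is_digit cs[i] = true ∨
            (cs[i] = '.' ∧ i < cs.length - 1 ∧ pv_is_digit (cs.getD (i + 1) ' ') = true)
        · rw [dif_pos hn]
          have hcls : ¬ (¬ pv_is_digit cs[i] = true ∧ cs[i] ≠ '.') := by tauto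
          have hge : i + 1 ≤ numLoopA cs i := numLoopA_succ_of_class cs i (by rwa [hg]) h
          have key : pvFinish (List.foldl pvStep (pvNormal acc cs[i]) (cs.drop (i + 1))) =
              if numLoopA cs i < cs.length
              then pvFinish ((cs.drop (numLoopA cs i)).foldl pvStep (acc ++ ['?'], .normal))
              else acc ++ ['?'] := by
            rcases hn with hd | ⟨hdot, hlt, hd2⟩
            · have hq9 : '0' ≤ cs[i] ∧ cs[i] ≤ '9' := (pv_is_digit_iff _).1 hd
              have hpn : pvNormal acc cs[i] = (acc ++ ['?'], .innum) := by
                simp only [pvNormal]; rw [if_neg hq, if_pos hq9]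
              rw [hpn, num_fold cs cs.length (i + 1) (acc ++ ['?']) (by omega),
                ← numLoopA_step cs i h hcls]
            · have h2 : i + 1 < cs.length := by omega
              have hg2 : cs.getD (i + 1) ' ' = cs[i + 1] := List.getD_eq_getElem _ _ h2
              have hnd9 : ¬ ('0' ≤ cs[i] ∧ cs[i] ≤ '9') := by rw [hdot]; decide
              have hpn : pvNormal acc cs[i] = (acc, .dot) := by
                simp only [pvNormal]; rw [if_neg hq, if_neg hnd9, if_pos hdot]
              have hd2' : '0' ≤ cs[i + 1] ∧ cs[i + 1] ≤ '9' := by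
                rw [hg2] at hd2; exact (pv_is_digit_iff _).1 hd2
              have hstep : pvStep (acc, PvSt.dot) cs[i + 1] = (acc ++ ['?'], .innum) := by
                simp only [pvStep]; rw [if_pos hd2']
              rw [hpn, pv_drop_cons cs (i + 1) h2, hg2, List.foldl_cons, hstep,
                num_fold cs cs.length (i + 2) (acc ++ ['?']) (by omega)]
              have s1 : numLoopA cs i = numLoopA cs (i + 1) := numLoopA_step cs i h hcls
              have s2 : numLoopA cs (i + 1) = numLoopA cs (i + 2) := by
                apply numLoopA_step cs (i + 1) h2
                rw [hg2] at hd2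
                intro hc; exact hc.1 hd2
              rw [← s2, ← s1]
          rw [key]
          by_cases he : numLoopA cs i ≥ cs.length
          · rw [dif_pos he, if_neg (by omega)]
          · rw [dif_neg he, if_pos (by omega),
              show numLoopA cs i - 1 + 1 = numLoopA cs i from by omega]
            exact ih _ _ (by omega)
        · rw [dif_neg hn]
          have hnd9 : ¬ ('0' ≤ cs[i] ∧ cs[i] ≤ '9') := fun hx => hn (Or.inl ((pv_is_digit_iff _).2 hx))
          by_cases hi : ¬ PySem.Chars.isalpha cs[i] = true ∧ cs[i] ≠ '_'
          · rw [dif_pos hi]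
            by_cases hdot : cs[i] = '.'
            · have hpn : pvNormal acc cs[i] = (acc, .dot) := by
                simp only [pvNormal]; rw [if_neg hq, if_neg hnd9, if_pos hdot]
              rw [hpn]
              by_cases h2 : i + 1 < cs.length
              · have hg2 : cs.getD (i + 1) ' ' = cs[i + 1] := List.getD_eq_getElem _ _ h2
                have hd2neg : ¬ ('0' ≤ cs[i + 1] ∧ cs[i + 1] ≤ '9') := by
                  intro hx
                  exact hn (Or.inr ⟨hdot, by omega, by rw [hg2]; exact (pv_is_digit_iff _).2 hx⟩)
                have hstep : pvStep (acc, PvSt.dot) cs[i + 1] = pvNormal (acc ++ ['.']) cs[i + 1] := by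
                  simp only [pvStep]; rw [if_neg hd2neg]
                rw [pv_drop_cons cs (i + 1) h2, hg2, List.foldl_cons, hstep, hdot,
                  ih (i + 1) (acc ++ ['.']) (by omega), pv_drop_cons cs (i + 1) h2, hg2,
                  List.foldl_cons]
                rfl
              · rw [List.drop_eq_nil_of_le (by omega), List.foldl_nil, hdot, loopA,
                  dif_neg (by omega)]
                rfl
            · have hident : ¬ (PySem.Chars.isalpha cs[i] = true ∨ cs[i] = '_') := by tauto
              have hpn : pvNormal acc cs[i] = (acc ++ [cs[i]], .normal) := by
                simp only [pvNormal]; rw [if_neg hq, if_neg hnd9, if_neg hdot, if_neg hident]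
              rw [hpn]
              exact ih _ _ (by omega)
          · rw [dif_neg hi]
            have hcls : PySem.Chars.isalpha cs[i] = true ∨ cs[i] = '_' := by tauto
            have hdot : cs[i] ≠ '.' := by
              intro he
              rw [he] at hcls
              rcases hcls with hc | hc
              · exact absurd hc (by decide)
              · exact absurd hc (by decide)
            have hpn : pvNormal acc cs[i] = (acc ++ [cs[i]], .inident) := by
              simp only [pvNormal]; rw [if_neg hq, if_neg hnd9, if_neg hdot, if_pos hcls]
            rw [hpn, ident_fold cs cs.length (i + 1) (acc ++ [cs[i]]) (by omega)]
            have hunfold : identLoopA cs i acc = identLoopA cs (i + 1) (acc ++ [cs[i]]) := by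
              rw [identLoopA, dif_pos h, hg, if_neg (by tauto)]
            rw [← hunfold]
            have hge : i + 1 ≤ (identLoopA cs i acc).2 :=
              identLoopA_succ_of_class cs i acc (by rw [hg]; tauto) h
            by_cases he : (identLoopA cs i acc).2 ≥ cs.length
            · rw [dif_pos he, if_neg (by omega)]
            · rw [dif_neg he, if_pos (by omega),
                show (identLoopA cs i acc).2 - 1 + 1 = (identLoopA cs i acc).2 from by omega]
              exact ih _ _ (by omega)
    · rw [loopA, dif_neg h, List.drop_eq_nil_of_le (by omega)]
      rfl

-- ===== VERDICT (by name: the statement is the Claim_ definition above) =====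
theorem get_masked_query_spec : Claim_equal_get_masked_query := by
  intro sql _
  unfold Spec_get_masked_query get_masked_query get_masked_query_alt
  split
  · rfl
  · rw [main_fold sql.toList sql.toList.length 0 [] (by omega), List.drop_zero]
    unfold pvFinish
    rcases sql.toList.foldl pvStep ([], PvSt.normal) with ⟨o, st⟩
    cases st <;> rfl
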